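-- pv_equiv track=rewrite | github.com/alexscarlatos/QuizGenerator | src/PatternGen.py | getAllPatterns
-- ===== SOURCE A (Python) =====
-- def getAllPatterns(chain_candidates):
--     pattern_candidates = []
--     for c1_i in range(len(chain_candidates)):
--         for c2_i in range(c1_i + 1, len(chain_candidates)):
--             # Get two candidate chains
--             c1 = chain_candidates[c1_i]
--             c2 = chain_candidates[c2_i]
--             c1_p = len(c1) - 1
--             c2_p = len(c2) - 1
--
--             # Must be rooted at the same verb
--             if c1[c1_p] != c2[c2_p]:
--                 continue
--
--             # Resulting pattern will have stem and two branches
--             pattern_stem = []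
--             pattern_lbranch = []
--             pattern_rbranch = []
--             pattern = [pattern_stem, pattern_lbranch, pattern_rbranch]
--
--             # Move down chains until they diverge
--             while c1[c1_p] == c2[c2_p]:
--                 pattern_stem.append(c1[c1_p])
--                 c1_p -= 1
--                 c2_p -= 1
--
--             # We don't want this pattern if one chain is a subset of the other
--             if c1_p < 0 or c2_p < 0:
--                 continue
--
--             # Add remaining tokens in c1
--             while c1_p >= 0:
--                 pattern_lbranch.append(c1[c1_p])
--                 c1_p -= 1
--
--             # Add remaining tokens in c2
--             while c2_p >= 0:
--                 pattern_rbranch.append(c2[c2_p])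
--                 c2_p -= 1
--
--             pattern_candidates.append(pattern)
--     return pattern_candidates
-- ===== SOURCE B (Python) =====
-- def getAllPatterns(chain_candidates):
--     # Bucket chain indexes by root verb (last token); compare each chain only
--     # with later same-root chains, walking precomputed reversals forward.
--     # Emission order (i, j) matches A's.
--     buckets = {}
--     for idx, chain in enumerate(chain_candidates):
--         if chain:
--             buckets.setdefault(chain[-1], []).append(idx)
--     revs = [c[::-1] for c in chain_candidates]
--     patterns = []
--     for i, c1 in enumerate(chain_candidates):
--         if not c1:
--             continue
--         r1 = c1[::-1]
--         for j in buckets[c1[-1]]: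
--             if j <= i:
--                 continue
--             r2 = revs[j]
--             p = 0
--             for x, y in zip(r1, r2):
--                 if x != y:
--                     break
--                 p += 1
--             if 0 < p < min(len(r1), len(r2)):
--                 patterns.append([r1[:p], r1[p:], r2[p:]])
--     return patterns
-- ===== Notes on version B (the rewrite author's own statement) =====
-- stated objective: alternative
-- what changed: B buckets chain indexes by root verb once and compares each chain only with later same-root chains by walking precomputed reversals forward with plain indexing, instead of A's all-pairs scan that walks every pair backwards through Python negative indexes; emission order (i, j) is preserved.
import Mathlib
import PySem

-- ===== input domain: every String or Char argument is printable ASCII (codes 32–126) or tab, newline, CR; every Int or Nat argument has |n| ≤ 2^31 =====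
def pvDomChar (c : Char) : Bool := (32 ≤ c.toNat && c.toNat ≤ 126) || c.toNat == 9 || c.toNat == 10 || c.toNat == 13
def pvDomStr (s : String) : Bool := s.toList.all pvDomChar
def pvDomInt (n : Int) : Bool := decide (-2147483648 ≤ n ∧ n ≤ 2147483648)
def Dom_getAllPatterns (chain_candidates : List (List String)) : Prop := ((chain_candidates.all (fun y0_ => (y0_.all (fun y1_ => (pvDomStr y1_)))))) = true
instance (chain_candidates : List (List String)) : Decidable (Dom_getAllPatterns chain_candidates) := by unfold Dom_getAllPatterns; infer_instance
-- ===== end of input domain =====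

-- B replaces A's all-pairs backward-walking scan by a one-pass bucketing of chain indexes by root
-- verb plus a forward comparison of the reversed chains, keeping A's output and emission order.

-- ===== PORT A =====
-- while c1[c1_p] == c2[c2_p]: stem.append(c1[c1_p]); both indexes -= 1
-- (the fuel argument only totalizes the recursion; where pyGet? is none the Python raises IndexError — excluded by Pre_)
def pyAStemLoop (c1 c2 : List String) : Nat → Int → Int → List String → List String × Int × Int
  | 0, p1, p2, stem => (stem, p1, p2)
  | fuel+1, p1, p2, stem =>
    match PySem.List.pyGet? c1 p1, PySem.List.pyGet? c2 p2 with
    | some a, some b =>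
        if a = b then pyAStemLoop c1 c2 fuel (p1 - 1) (p2 - 1) (stem ++ [a])
        else (stem, p1, p2)
    | _, _ => (stem, p1, p2)

-- while p >= 0: branch.append(c[p]); p -= 1
def pyABranchLoop (c : List String) : Nat → Int → List String → List String
  | 0, _, acc => acc
  | fuel+1, p, acc =>
    if 0 ≤ p then pyABranchLoop c fuel (p - 1) (acc ++ [(PySem.List.pyGet? c p).getD ""])
    else acc

-- the body of A's inner loop for one pair (c1, c2): some pattern to append, none = continue
def pyAPair (c1 c2 : List String) : Option (List (List String)) :=
  let c1_p : Int := (c1.length : Int) - 1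
  let c2_p : Int := (c2.length : Int) - 1
  match PySem.List.pyGet? c1 c1_p, PySem.List.pyGet? c2 c2_p with
  | some a, some b =>
      if a ≠ b then none
      else
        let r := pyAStemLoop c1 c2 (2 * c1.length + 2) c1_p c2_p []
        if r.2.1 < 0 ∨ r.2.2 < 0 then none
        else some [r.1, pyABranchLoop c1 (c1.length + 1) r.2.1 [],
                   pyABranchLoop c2 (c2.length + 1) r.2.2 []]
  | _, _ => none

def getAllPatterns (chain_candidates : List (List String)) : List (List (List String)) :=
  (PySem.List.pyRange 0 (chain_candidates.length) 1).foldl (fun acc c1_i =>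
    (PySem.List.pyRange (c1_i + 1) (chain_candidates.length) 1).foldl (fun acc c2_i =>
      match pyAPair (PySem.List.pyGetD chain_candidates c1_i [])
                    (PySem.List.pyGetD chain_candidates c2_i []) with
      | some pattern => acc ++ [pattern]
      | none => acc) acc) []

-- ===== PORT B =====
-- root verb of a chain: chain[-1]
def bRoot (c : List String) : String := (PySem.List.pyGet? c (-1)).getD ""

-- buckets.setdefault(chain[-1], []).append(idx) over enumerate(chain_candidates), skipping empty chains
def bBuckets (chain_candidates : List (List String)) : PySem.Dict String (List Int) :=
  (PySem.List.enumerate chain_candidates 0).foldl (fun d ic =>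
    if ic.2 = [] then d
    else d.insert (bRoot ic.2) (d.getD (bRoot ic.2) [] ++ [ic.1])) PySem.Dict.empty

-- p = 0; for x, y in zip(r1, r2): if x != y: break; p += 1
def bMatchLen : List String → List String → Nat
  | x :: xs, y :: ys => if x = y then bMatchLen xs ys + 1 else 0
  | _, _ => 0

def getAllPatterns_alt (chain_candidates : List (List String)) : List (List (List String)) :=
  let buckets := bBuckets chain_candidates
  let revs := chain_candidates.map List.reverse
  (PySem.List.enumerate chain_candidates 0).foldl (fun acc ic =>
    if ic.2 = [] then acc
    else
      let r1 := ic.2.reverse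
      (buckets.getD (bRoot ic.2) []).foldl (fun acc j =>
        if j ≤ ic.1 then acc
        else
          let r2 := PySem.List.pyGetD revs j []
          let p := bMatchLen r1 r2
          if 0 < p ∧ p < min r1.length r2.length then
            acc ++ [[r1.take p, r1.drop p, r2.drop p]] else acc) acc) []

-- ===== PRECONDITION & SPEC =====
-- the token sequence A's comparison loop can read from a chain (Python negative indexes wrap once): its reversal, twice
def pvDup (c : List String) : List String := c.reverse ++ c.reverse

-- Pre_ excludes exactly the inputs on which A raises IndexError: a pair containing an empty chain, or a
-- same-rooted pair whose comparison loop finds no mismatch before running off a chain (e.g. two identical chains).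
def Pre_getAllPatterns (chain_candidates : List (List String)) : Prop :=
  List.Pairwise (fun c1 c2 => ¬ pvDup c1 <+: pvDup c2 ∧ ¬ pvDup c2 <+: pvDup c1) chain_candidates
instance (chain_candidates : List (List String)) : Decidable (Pre_getAllPatterns chain_candidates) := by
  unfold Pre_getAllPatterns; infer_instance

def pvWitness_getAllPatterns : List (List String) := [["a", "b"], ["c", "b"]]

def Spec_getAllPatterns (chain_candidates : List (List String)) (out : List (List (List String))) : Prop := out = getAllPatterns_alt chain_candidates
instance (chain_candidates : List (List String)) (out : List (List (List String))) : Decidable (Spec_getAllPatterns chain_candidates out) := by unfold Spec_getAllPatterns; infer_instance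

-- ===== CLAIM (what is proved, stated in full; the proofs are below) =====
def Claim_equal_getAllPatterns : Prop := ∀ (chain_candidates : List (List String)), Dom_getAllPatterns chain_candidates → Pre_getAllPatterns chain_candidates → Spec_getAllPatterns chain_candidates (getAllPatterns chain_candidates)

-- ===== LEMMAS AND PROOFS =====

-- common-prefix length of two lists
def cpl : List String → List String → Nat
  | a :: as, b :: bs => if a = b then cpl as bs + 1 else 0
  | _, _ => 0

-- the value both programs produce for one ordered pair of chains
def specPair (c1 c2 : List String) : List (List (List String)) :=
  if 0 < cpl c1.reverse c2.reverse ∧ cpl c1.reverse c2.reverse < c1.reverse.length ∧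
      cpl c1.reverse c2.reverse < c2.reverse.length
  then [[c1.reverse.take (cpl c1.reverse c2.reverse), c1.reverse.drop (cpl c1.reverse c2.reverse),
         c2.reverse.drop (cpl c1.reverse c2.reverse)]]
  else []

def specOut (cs : List (List String)) : List (List (List String)) :=
  (PySem.List.pyRange 0 (cs.length) 1).flatMap (fun i =>
    (PySem.List.pyRange 0 (cs.length) 1).flatMap (fun j =>
      if i < j then specPair (PySem.List.pyGetD cs i []) (PySem.List.pyGetD cs j []) else []))

theorem cpl_le_left (a b : List String) : cpl a b ≤ a.length := by
  induction a generalizing b with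
  | nil => simp [cpl]
  | cons x xs ih =>
    cases b with
    | nil => simp [cpl]
    | cons y ys => simp only [cpl]; split_ifs <;> simp [ih]

theorem cpl_le_right (a b : List String) : cpl a b ≤ b.length := by
  induction a generalizing b with
  | nil => simp [cpl]
  | cons x xs ih =>
    cases b with
    | nil => simp [cpl]
    | cons y ys => simp only [cpl]; split_ifs <;> simp [ih]

theorem cpl_getD_eq (a b : List String) (k : Nat) (h : k < cpl a b) :
    a.getD k "" = b.getD k "" := by
  induction a generalizing b k with
  | nil => simp [cpl] at h
  | cons x xs ih =>
    cases b with
    | nil => simp [cpl] at h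
    | cons y ys =>
      simp only [cpl] at h
      split_ifs at h with hxy
      · cases k with
        | zero => simpa using hxy
        | succ k => simpa using ih ys k (by omega)
      · omega

theorem cpl_getD_ne (a b : List String) (h1 : cpl a b < a.length) (h2 : cpl a b < b.length) :
    a.getD (cpl a b) "" ≠ b.getD (cpl a b) "" := by
  induction a generalizing b with
  | nil => simp at h1
  | cons x xs ih =>
    cases b with
    | nil => simp at h2
    | cons y ys =>
      simp only [cpl, List.length_cons] at h1 h2 ⊢
      by_cases hxy : x = y
      · rw [if_pos hxy] at h1 h2 ⊢
        simpa using ih ys (by omega) (by omega)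
      · rw [if_neg hxy] at h1 h2 ⊢
        simpa using hxy

theorem cpl_lt_of_not_prefix (a b : List String) (h1 : ¬ a <+: b) (h2 : ¬ b <+: a) :
    cpl a b < a.length ∧ cpl a b < b.length := by
  induction a generalizing b with
  | nil => exact absurd (List.nil_prefix) h1
  | cons x xs ih =>
    cases b with
    | nil => exact absurd (List.nil_prefix) h2
    | cons y ys =>
      simp only [cpl]
      by_cases hxy : x = y
      · subst hxy
        simp only [List.cons_prefix_cons, true_and] at h1 h2
        have := ih ys (by simpa using h1) (by simpa using h2)
        rw [if_pos rfl]
        simp only [List.length_cons]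
        omega
      · simp [hxy]

theorem cpl_append (a b t1 t2 : List String) :
    min (cpl (a ++ t1) (b ++ t2)) (min a.length b.length) = cpl a b := by
  induction a generalizing b with
  | nil => simp [cpl]
  | cons x xs ih =>
    cases b with
    | nil => simp [cpl]
    | cons y ys =>
      simp only [List.cons_append, cpl]
      split_ifs with hxy
      · have := ih ys
        simp only [List.length_cons]
        omega
      · simp

theorem cpl_nil_right (a : List String) : cpl a [] = 0 := by
  cases a <;> rfl

theorem flatMap_filter {α β : Type} (l : List α) (p : α → Bool) (g : α → List β) :
    (l.filter p).flatMap g = l.flatMap (fun x => if p x then g x else []) := by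
  induction l with
  | nil => simp
  | cons x xs ih =>
    by_cases h : p x <;> simp [h, ih]

theorem pyGet?_wrap (c : List String) (k : Nat) :
    PySem.List.pyGet? c ((c.length : Int) - 1 - k) = (pvDup c)[k]? := by
  unfold pvDup
  rcases lt_or_ge k c.length with h | h
  · have h0 : (0:Int) ≤ (c.length : Int) - 1 - k := by omega
    have ht : ((c.length : Int) - 1 - k).toNat = c.length - 1 - k := by omega
    rw [PySem.List.pyGet?_of_nonneg _ h0, ht,
        List.getElem?_append_left (by simpa using h), List.getElem?_reverse h]
  · rcases lt_or_ge k (2 * c.length) with h2 | h2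
    · have hk' : (c.length : Int) - 1 - k = -(((k + 1 - c.length : Nat) : Int)) := by
        omega
      rw [hk', PySem.List.pyGet?_neg_natCast _ _ (by omega) (by omega),
          List.getElem?_append_right (by simp; omega), List.length_reverse,
          List.getElem?_reverse (by omega)]
      congr 1
      omega
    · have : PySem.List.pyGet? c ((c.length : Int) - 1 - k) = none := by
        rw [PySem.List.pyGet?_eq_none_iff]
        unfold PySem.Raise.InRange
        omega
      rw [this]
      symm
      rw [List.getElem?_eq_none_iff]
      simp
      omega

theorem pyAStemLoop_spec (c1 c2 : List String)
    (hq1 : cpl (pvDup c1) (pvDup c2) < (pvDup c1).length)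
    (hq2 : cpl (pvDup c1) (pvDup c2) < (pvDup c2).length) :
    ∀ (fuel k : Nat) (stem : List String), k ≤ cpl (pvDup c1) (pvDup c2) →
      cpl (pvDup c1) (pvDup c2) - k < fuel →
      pyAStemLoop c1 c2 fuel ((c1.length : Int) - 1 - k) ((c2.length : Int) - 1 - k) stem
        = (stem ++ ((pvDup c1).drop k).take (cpl (pvDup c1) (pvDup c2) - k),
           (c1.length : Int) - 1 - cpl (pvDup c1) (pvDup c2),
           (c2.length : Int) - 1 - cpl (pvDup c1) (pvDup c2)) := by
  set q := cpl (pvDup c1) (pvDup c2) with hq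
  intro fuel
  induction fuel with
  | zero => intro k stem _ h2; omega
  | succ f ih =>
    intro k stem hk hf
    have hk1 : k < (pvDup c1).length := by omega
    have hk2 : k < (pvDup c2).length := by omega
    have e1 : PySem.List.pyGet? c1 ((c1.length : Int) - 1 - k) = some ((pvDup c1).getD k "") := by
      rw [pyGet?_wrap, List.getElem?_eq_getElem hk1, List.getD_eq_getElem _ _ hk1]
    have e2 : PySem.List.pyGet? c2 ((c2.length : Int) - 1 - k) = some ((pvDup c2).getD k "") := by
      rw [pyGet?_wrap, List.getElem?_eq_getElem hk2, List.getD_eq_getElem _ _ hk2]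
    rw [pyAStemLoop]
    rw [e1, e2]
    dsimp only
    rcases Nat.lt_or_ge k q with hlt | hge
    · have heq : (pvDup c1).getD k "" = (pvDup c2).getD k "" := cpl_getD_eq _ _ _ (by omega)
      simp only [heq, if_true]
      have harg1 : (c1.length : Int) - 1 - k - 1 = (c1.length : Int) - 1 - (k+1 : Nat) := by
        push_cast; ring
      have harg2 : (c2.length : Int) - 1 - k - 1 = (c2.length : Int) - 1 - (k+1 : Nat) := by
        push_cast; ring
      rw [harg1, harg2, ih (k+1) (stem ++ [(pvDup c2).getD k ""]) (by omega) (by omega)]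
      rw [List.append_assoc]
      have hdrop : (pvDup c1).drop k = (pvDup c1).getD k "" :: (pvDup c1).drop (k+1) := by
        rw [List.getD_eq_getElem _ _ hk1]
        exact (List.getElem_cons_drop hk1).symm
      rw [hdrop, heq]
      have : q - k = (q - (k+1)) + 1 := by omega
      rw [this, List.take_succ_cons]
      simp
    · have hke : k = q := by omega
      have hne : (pvDup c1).getD k "" ≠ (pvDup c2).getD k "" := by
        rw [hke]; exact cpl_getD_ne _ _ (by omega) (by omega)
      rw [if_neg hne, hke]
      simp

theorem pyABranchLoop_neg (c : List String) :
    ∀ (fuel : Nat) (p : Int) (acc : List String), p < 0 → pyABranchLoop c fuel p acc = acc := by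
  intro fuel p acc hp
  cases fuel with
  | zero => rw [pyABranchLoop]
  | succ f => rw [pyABranchLoop, if_neg (by omega)]

theorem pyABranchLoop_spec (c : List String) :
    ∀ (p fuel : Nat) (acc : List String), p < fuel → p < c.length →
      pyABranchLoop c fuel (p : Int) acc = acc ++ (c.take (p + 1)).reverse := by
  intro p
  induction p with
  | zero =>
    intro fuel acc hf hc
    obtain ⟨f, rfl⟩ : ∃ f, fuel = f + 1 := ⟨fuel - 1, by omega⟩
    rw [pyABranchLoop, if_pos (by omega)]
    have harg : ((0:Nat) : Int) - 1 = (-1 : Int) := by norm_num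
    rw [harg, pyABranchLoop_neg c f _ _ (by omega)]
    have e : (PySem.List.pyGet? c ((0 : Nat) : Int)).getD "" = c.getD 0 "" := by
      rw [PySem.List.pyGet?_natCast]
      simp [List.getD_eq_getElem?_getD]
    rw [e]
    congr 1
    rw [List.getD_eq_getElem _ _ hc]
    rcases List.exists_cons_of_ne_nil (List.ne_nil_of_length_pos hc) with ⟨x, xs, hx⟩
    subst hx
    simp
  | succ p ih =>
    intro fuel acc hf hc
    obtain ⟨f, rfl⟩ : ∃ f, fuel = f + 1 := ⟨fuel - 1, by omega⟩
    rw [pyABranchLoop, if_pos (by positivity)]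
    have harg : ((p+1 : Nat) : Int) - 1 = (p : Int) := by push_cast; ring
    rw [harg, ih f _ (by omega) (by omega)]
    have e : (PySem.List.pyGet? c ((p+1 : Nat) : Int)).getD "" = c.getD (p+1) "" := by
      rw [PySem.List.pyGet?_natCast]
      simp [List.getD_eq_getElem?_getD]
    rw [e]
    have : c.take (p + 1 + 1) = c.take (p + 1) ++ [c.getD (p+1) ""] := by
      rw [List.getD_eq_getElem _ _ hc]
      rw [List.take_add_one]
      simp [List.getElem?_eq_getElem hc]
    rw [this]
    simp

theorem pyAPair_spec (c1 c2 : List String)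
    (h1 : ¬ pvDup c1 <+: pvDup c2) (h2 : ¬ pvDup c2 <+: pvDup c1) :
    (pyAPair c1 c2).toList = specPair c1 c2 := by
  obtain ⟨hq1, hq2⟩ := cpl_lt_of_not_prefix _ _ h1 h2
  set q := cpl (pvDup c1) (pvDup c2) with hqdef
  have hd1 : (pvDup c1).length = 2 * c1.length := by simp [pvDup]; omega
  have hd2 : (pvDup c2).length = 2 * c2.length := by simp [pvDup]; omega
  have hc1 : c1 ≠ [] := by
    intro h; apply h1; rw [h]; simp [pvDup]
  have hc2 : c2 ≠ [] := by
    intro h; apply h2; rw [h]; simp [pvDup]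
  have hl1 : 0 < c1.length := List.length_pos_of_ne_nil hc1
  have hl2 : 0 < c2.length := List.length_pos_of_ne_nil hc2
  have hcplrev : cpl c1.reverse c2.reverse = min q (min c1.length c2.length) := by
    have := cpl_append c1.reverse c2.reverse c1.reverse c2.reverse
    simp only [List.length_reverse] at this
    rw [← this]
    rfl
  have e0 : ∀ c : List String, (c.length : Int) - 1 = (c.length : Int) - 1 - ((0:Nat) : Int) := by
    intro c; simp
  have g1 : PySem.List.pyGet? c1 ((c1.length : Int) - 1) = some ((pvDup c1).getD 0 "") := by
    rw [e0, pyGet?_wrap, List.getElem?_eq_getElem (by omega), List.getD_eq_getElem _ _ (by omega)]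
  have g2 : PySem.List.pyGet? c2 ((c2.length : Int) - 1) = some ((pvDup c2).getD 0 "") := by
    rw [e0, pyGet?_wrap, List.getElem?_eq_getElem (by omega), List.getD_eq_getElem _ _ (by omega)]
  simp only [pyAPair, specPair, g1, g2]
  by_cases hroot : (pvDup c1).getD 0 "" = (pvDup c2).getD 0 ""
  · have hq0 : 0 < q := by
      rcases Nat.eq_zero_or_pos q with h0 | h0
      · exact absurd (show (pvDup c1).getD (cpl (pvDup c1) (pvDup c2)) ""
            = (pvDup c2).getD (cpl (pvDup c1) (pvDup c2)) "" by
            rw [← hqdef, h0]; exact hroot) (cpl_getD_ne _ _ hq1 hq2)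
      · exact h0
    rw [if_neg (fun hcon => hcon hroot)]
    rw [e0 c1, e0 c2,
        pyAStemLoop_spec c1 c2 hq1 hq2 (2*c1.length+2) 0 [] (by omega) (by omega)]
    simp only [List.drop_zero, Nat.sub_zero, List.nil_append]
    by_cases hin : q < c1.length ∧ q < c2.length
    · rw [if_neg (by omega)]
      have hpq : cpl c1.reverse c2.reverse = q := by rw [hcplrev]; omega
      rw [hpq, if_pos ⟨hq0, by simp only [List.length_reverse]; omega,
                        by simp only [List.length_reverse]; omega⟩]
      have hb1 : ((c1.length : Int) - 1 - q) = ((c1.length - 1 - q : Nat) : Int) := by omega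
      have hb2 : ((c2.length : Int) - 1 - q) = ((c2.length - 1 - q : Nat) : Int) := by omega
      rw [hb1, hb2,
          pyABranchLoop_spec c1 (c1.length - 1 - q) (c1.length + 1) [] (by omega) (by omega),
          pyABranchLoop_spec c2 (c2.length - 1 - q) (c2.length + 1) [] (by omega) (by omega)]
      have ht1 : c1.length - 1 - q + 1 = c1.length - q := by omega
      have ht2 : c2.length - 1 - q + 1 = c2.length - q := by omega
      rw [ht1, ht2]
      have htake : List.take q (pvDup c1) = List.take q c1.reverse := by
        unfold pvDup
        exact List.take_append_of_le_length (by simp only [List.length_reverse]; omega)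
      rw [htake, List.drop_reverse, List.drop_reverse]
      simp
    · rw [if_pos (by omega)]
      rw [hcplrev, if_neg]
      · rfl
      · rintro ⟨-, hA, hB⟩
        simp only [List.length_reverse] at hA hB
        omega
  · rw [if_pos hroot]
    have hq0 : q = 0 := by
      by_contra h
      exact hroot (cpl_getD_eq _ _ 0 (by omega))
    rw [hcplrev, hq0]
    simp

theorem specPair_nil_left (c2 : List String) : specPair [] c2 = [] := by
  simp [specPair, cpl]

theorem bMatchLen_eq_cpl (r1 r2 : List String) : bMatchLen r1 r2 = cpl r1 r2 := by
  induction r1 generalizing r2 with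
  | nil => cases r2 <;> rfl
  | cons x xs ih =>
    cases r2 with
    | nil => rfl
    | cons y ys => simp only [bMatchLen, cpl, ih]

theorem pyGetD_map_reverse (cs : List (List String)) (j : Int) :
    PySem.List.pyGetD (cs.map List.reverse) j [] = (PySem.List.pyGetD cs j []).reverse := by
  have := PySem.List.pyGetD_map (f := List.reverse) (xs := cs) (i := j) (d := [])
  simpa using this

theorem cpl_reverse_root (c1 c2 : List String) (h1 : c1 ≠ []) (h2 : c2 ≠ [])
    (h : bRoot c1 ≠ bRoot c2) : cpl c1.reverse c2.reverse = 0 := by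
  have e1 : bRoot c1 = (c1.reverse.head?).getD "" := by
    unfold bRoot
    rw [PySem.List.pyGet?_neg_one, List.head?_reverse]
  have e2 : bRoot c2 = (c2.reverse.head?).getD "" := by
    unfold bRoot
    rw [PySem.List.pyGet?_neg_one, List.head?_reverse]
  rcases List.exists_cons_of_ne_nil (by simpa using h1 : c1.reverse ≠ []) with ⟨x, xs, hx⟩
  rcases List.exists_cons_of_ne_nil (by simpa using h2 : c2.reverse ≠ []) with ⟨y, ys, hy⟩
  rw [hx, hy]
  rw [e1, e2, hx, hy] at h
  simp only [List.head?_cons, Option.getD_some] at h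
  simp [cpl, h]

theorem bBuckets_getD (cs : List (List String)) (r : String) :
    (bBuckets cs).getD r [] =
      ((PySem.List.enumerate cs 0).filter
        (fun ic => decide (ic.2 ≠ [] ∧ bRoot ic.2 = r))).map (·.1) := by
  unfold bBuckets
  generalize PySem.List.enumerate cs 0 = l
  suffices h : ∀ (d : PySem.Dict String (List Int)),
      (l.foldl (fun d ic =>
        if ic.2 = [] then d
        else d.insert (bRoot ic.2) (d.getD (bRoot ic.2) [] ++ [ic.1])) d).getD r []
      = d.getD r [] ++ ((l.filter (fun ic => decide (ic.2 ≠ [] ∧ bRoot ic.2 = r))).map (·.1)) by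
    rw [h PySem.Dict.empty]
    simp [PySem.Dict.getD_empty]
  induction l with
  | nil => intro d; simp
  | cons ic t ih =>
    intro d
    simp only [List.foldl_cons, List.filter_cons]
    by_cases hnil : ic.2 = []
    · rw [if_pos hnil, ih d]
      have : (decide (ic.2 ≠ [] ∧ bRoot ic.2 = r)) = false := by simp [hnil]
      rw [this]
      simp
    · rw [if_neg hnil]
      rw [ih]
      by_cases hr : bRoot ic.2 = r
      · have : (decide (ic.2 ≠ [] ∧ bRoot ic.2 = r)) = true := by simp [hnil, hr]
        rw [this]
        rw [hr, PySem.Dict.getD_insert]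
        simp
      · have : (decide (ic.2 ≠ [] ∧ bRoot ic.2 = r)) = false := by simp [hr]
        rw [this]
        rw [PySem.Dict.getD_insert, if_neg (fun h => hr h.symm)]
        simp

-- the value B's bucket-pair body produces, as a named term
def bPair (c1 c2 : List String) : List (List (List String)) :=
  if 0 < bMatchLen c1.reverse c2.reverse ∧
      bMatchLen c1.reverse c2.reverse < min c1.reverse.length c2.reverse.length
  then [[c1.reverse.take (bMatchLen c1.reverse c2.reverse),
         c1.reverse.drop (bMatchLen c1.reverse c2.reverse),
         c2.reverse.drop (bMatchLen c1.reverse c2.reverse)]]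
  else []

theorem specPair_skip (c1 c2 : List String) (hc1 : c1 ≠ [])
    (h : ¬ (c2 ≠ [] ∧ bRoot c2 = bRoot c1)) : specPair c1 c2 = [] := by
  unfold specPair
  by_cases hc2 : c2 = []
  · subst hc2
    simp [cpl_nil_right]
  · have hr : bRoot c2 ≠ bRoot c1 := by tauto
    rw [cpl_reverse_root c1 c2 hc1 hc2 (fun e => hr e.symm)]
    simp

theorem bPair_eq_specPair (c1 c2 : List String) : bPair c1 c2 = specPair c1 c2 := by
  have h1 := cpl_le_left c1.reverse c2.reverse
  have h2 := cpl_le_right c1.reverse c2.reverse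
  unfold bPair specPair
  rw [bMatchLen_eq_cpl]
  by_cases hcond : 0 < cpl c1.reverse c2.reverse ∧
      cpl c1.reverse c2.reverse < min c1.reverse.length c2.reverse.length
  · rw [if_pos hcond, if_pos ⟨hcond.1, by omega, by omega⟩]
  · rw [if_neg hcond, if_neg (by omega)]

theorem bInner (cs : List (List String)) (i : Int) (c1 : List String) (hc1 : c1 ≠ [])
    (acc : List (List (List String))) :
    ((bBuckets cs).getD (bRoot c1) []).foldl (fun acc j =>
        if j ≤ i then acc
        else
          if 0 < bMatchLen c1.reverse (PySem.List.pyGetD (cs.map List.reverse) j []) ∧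
             bMatchLen c1.reverse (PySem.List.pyGetD (cs.map List.reverse) j [])
               < min c1.reverse.length (PySem.List.pyGetD (cs.map List.reverse) j []).length
          then acc ++ [[c1.reverse.take (bMatchLen c1.reverse (PySem.List.pyGetD (cs.map List.reverse) j [])),
              c1.reverse.drop (bMatchLen c1.reverse (PySem.List.pyGetD (cs.map List.reverse) j [])),
              (PySem.List.pyGetD (cs.map List.reverse) j []).drop
                (bMatchLen c1.reverse (PySem.List.pyGetD (cs.map List.reverse) j []))]]
          else acc) acc
      = acc ++ (PySem.List.pyRange 0 (cs.length) 1).flatMap (fun j =>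
          if i < j then specPair c1 (PySem.List.pyGetD cs j []) else []) := by
  rw [PySem.List.foldl_congr_mem _ _
      (fun acc j => acc ++ (if j ≤ i then [] else bPair c1 (PySem.List.pyGetD cs j []))) _
      (by
        intro acc j _
        dsimp only
        by_cases hle : j ≤ i
        · rw [if_pos hle, if_pos hle]
          simp
        · rw [if_neg hle, if_neg hle, pyGetD_map_reverse]
          unfold bPair
          split_ifs <;> simp)]
  rw [PySem.List.foldl_append_eq_flatMap]
  congr 1
  rw [bBuckets_getD, PySem.List.enumerate_eq_map_pyRange cs []]
  have hlen : PySem.List.len cs = (cs.length : Int) := by simp [PySem.List.len]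
  rw [hlen, List.filter_map, List.map_map]
  simp only [Function.comp_def]
  rw [List.map_id', flatMap_filter]
  apply List.flatMap_congr
  intro j _
  by_cases hQ : (PySem.List.pyGetD cs j [] ≠ [] ∧
      bRoot (PySem.List.pyGetD cs j []) = bRoot c1)
  · rw [if_pos (show decide (PySem.List.pyGetD cs j [] ≠ [] ∧
        bRoot (PySem.List.pyGetD cs j []) = bRoot c1) = true by simpa using hQ)]
    by_cases hij : i < j
    · rw [if_neg (by omega), if_pos hij, bPair_eq_specPair]
    · rw [if_pos (by omega), if_neg hij]
  · rw [if_neg (show ¬ decide (PySem.List.pyGetD cs j [] ≠ [] ∧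
        bRoot (PySem.List.pyGetD cs j []) = bRoot c1) = true by simpa using hQ)]
    by_cases hij : i < j
    · rw [if_pos hij, specPair_skip _ _ hc1 hQ]
    · rw [if_neg hij]

theorem alt_eq_spec (cs : List (List String)) : getAllPatterns_alt cs = specOut cs := by
  simp only [getAllPatterns_alt]
  rw [PySem.List.foldl_congr_mem _ _
      (fun acc ic => acc ++ (if ic.2 = [] then [] else
        (PySem.List.pyRange 0 (cs.length) 1).flatMap (fun j =>
          if ic.1 < j then specPair ic.2 (PySem.List.pyGetD cs j []) else []))) _
      (by
        intro acc ic _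
        dsimp only
        by_cases hnil : ic.2 = []
        · rw [if_pos hnil, if_pos hnil]
          simp
        · rw [if_neg hnil, if_neg hnil, bInner cs ic.1 ic.2 hnil acc])]
  rw [PySem.List.foldl_append_eq_flatMap, List.nil_append]
  rw [PySem.List.enumerate_eq_map_pyRange cs []]
  have hlen : PySem.List.len cs = (cs.length : Int) := by simp [PySem.List.len]
  rw [hlen, List.flatMap_map]
  unfold specOut
  apply List.flatMap_congr
  intro i _
  by_cases hnil : PySem.List.pyGetD cs i [] = []
  · rw [if_pos hnil]
    symm
    rw [List.flatMap_eq_nil_iff]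
    intro j _
    by_cases hij : i < j
    · rw [if_pos hij, hnil, specPair_nil_left]
    · rw [if_neg hij]
  · rw [if_neg hnil]

theorem a_eq_spec (cs : List (List String)) (hpre : Pre_getAllPatterns cs) :
    getAllPatterns cs = specOut cs := by
  unfold getAllPatterns
  rw [PySem.List.foldl_congr_mem _ _
      (fun acc i => acc ++ (PySem.List.pyRange (i + 1) (cs.length) 1).flatMap (fun j =>
        (pyAPair (PySem.List.pyGetD cs i []) (PySem.List.pyGetD cs j [])).toList)) _
      (by
        intro acc i _
        dsimp only
        rw [PySem.List.foldl_congr_mem _ _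
            (fun acc j => acc ++ (pyAPair (PySem.List.pyGetD cs i [])
              (PySem.List.pyGetD cs j [])).toList) _
            (by
              intro acc j _
              dsimp only
              cases hp : pyAPair (PySem.List.pyGetD cs i []) (PySem.List.pyGetD cs j []) <;>
                simp)]
        rw [PySem.List.foldl_append_eq_flatMap])]
  rw [PySem.List.foldl_append_eq_flatMap, List.nil_append]
  unfold specOut
  apply List.flatMap_congr
  intro i hi
  rw [PySem.List.mem_pyRange_one] at hi
  rw [PySem.List.pyRange_one_append 0 (i+1) (cs.length) (by omega) (by omega),
      List.flatMap_append]
  have hfirst : (PySem.List.pyRange 0 (i+1) 1).flatMap (fun j =>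
      if i < j then specPair (PySem.List.pyGetD cs i []) (PySem.List.pyGetD cs j []) else [])
      = [] := by
    rw [List.flatMap_eq_nil_iff]
    intro j hj
    rw [PySem.List.mem_pyRange_one] at hj
    rw [if_neg (by omega)]
  rw [hfirst, List.nil_append]
  apply List.flatMap_congr
  intro j hj
  rw [PySem.List.mem_pyRange_one] at hj
  rw [if_pos (by omega)]
  have e1 : PySem.List.pyGetD cs i [] = cs[i.toNat] :=
    PySem.List.pyGetD_eq_getElem cs [] (by omega) (by omega)
  have e2 : PySem.List.pyGetD cs j [] = cs[j.toNat] :=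
    PySem.List.pyGetD_eq_getElem cs [] (by omega) (by omega)
  have hR := (List.pairwise_iff_getElem.mp hpre) i.toNat j.toNat (by omega) (by omega) (by omega)
  rw [e1, e2]
  exact pyAPair_spec _ _ hR.1 hR.2

-- ===== VERDICT (by name: the statement is the Claim_ definition above) =====
theorem getAllPatterns_spec : Claim_equal_getAllPatterns := by
  intro cs _ hpre
  unfold Spec_getAllPatterns
  rw [a_eq_spec cs hpre, alt_eq_spec]
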